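-- pv_equiv track=rewrite | github.com/orest-d/liquer | liquer/context.py | find_queries_in_template
-- ===== SOURCE A (Python) =====
-- def find_queries_in_template(template: str, prefix: str, sufix: str):
--     try:
--         start = template.index(prefix)
--         end = template.index(sufix, start + len(prefix))
--         yield template[:start], template[start + len(prefix) : end]
--         for text, query in find_queries_in_template(
--             template[end + len(sufix) :], prefix, sufix
--         ):
--             yield text, query
--     except ValueError:
--         yield template, None
-- ===== SOURCE B (Python) =====
-- def find_queries_in_template(template: str, prefix: str, sufix: str):
--     # single left-to-right character scan accumulating text chars; commits to a
--     # query only when a prefix match at the cursor has a sufix somewhere after it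
--     text = []
--     i = 0
--     n = len(template)
--     while i < n:
--         if template.startswith(prefix, i):
--             j = template.find(sufix, i + len(prefix))
--             if j != -1:
--                 yield "".join(text), template[i + len(prefix):j]
--                 text = []
--                 i = j + len(sufix)
--                 continue
--         text.append(template[i])
--         i += 1
--     yield "".join(text), None
-- ===== Notes on version B (the rewrite author's own statement) =====
-- stated objective: alternative
-- what changed: A recursively re-slices the remaining template and chains a nested generator per match; B is a single character-level scan with a cursor and a text accumulator that commits to a query only when a prefix match has a sufix after it, so no remainder copies or nested generators are made.
import Mathlib
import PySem

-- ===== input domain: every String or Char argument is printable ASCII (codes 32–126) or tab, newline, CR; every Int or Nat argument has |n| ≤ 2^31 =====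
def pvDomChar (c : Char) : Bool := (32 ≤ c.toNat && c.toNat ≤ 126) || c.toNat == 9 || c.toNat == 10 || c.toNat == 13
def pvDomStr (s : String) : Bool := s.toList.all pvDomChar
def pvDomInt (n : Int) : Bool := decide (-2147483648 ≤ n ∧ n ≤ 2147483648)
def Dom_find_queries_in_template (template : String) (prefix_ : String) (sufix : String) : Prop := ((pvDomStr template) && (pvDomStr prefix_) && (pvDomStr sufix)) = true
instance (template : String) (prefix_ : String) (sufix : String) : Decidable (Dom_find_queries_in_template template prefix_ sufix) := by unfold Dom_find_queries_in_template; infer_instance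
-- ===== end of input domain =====

-- B replaces A's recursive remainder-slicing by a single character-level scan with a text
-- accumulator (objective: alternative algorithm, no remainder copies or nested generators);
-- both are generators, compared fully consumed.

-- ===== PORT A =====
-- A recurses on template[end+len(sufix):]; the fuel (length+1) covers every level A reaches
-- whenever the recursion terminates (each recursive step strictly shortens the template then).
def pvGoA (fuel : Nat) (t p s : List Char) : List (List Char × Option (List Char)) :=
  match fuel with
  | 0 => []
  | fuel + 1 =>
    let start := PySem.Chars.find t p
    if start = -1 then [(t, none)]
    else
      let e := PySem.Chars.findFrom t s (start + p.length) none
      if e = -1 then [(t, none)]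
      else (PySem.Chars.slice t none (some start),
            some (PySem.Chars.slice t (some (start + p.length)) (some e)))
           :: pvGoA fuel (PySem.Chars.slice t (some (e + s.length)) none) p s

def find_queries_in_template (template : String) (prefix_ : String) (sufix : String) : List (String × Option String) :=
  (pvGoA (template.toList.length + 1) template.toList prefix_.toList sufix.toList).map
    (fun q => (String.ofList q.1, q.2.map String.ofList))

-- ===== PORT B =====
-- B's while-loop: cursor i over the characters, accumulator text of scanned text characters;
-- fuel length+1 covers every iteration whenever |prefix|+|sufix| ≥ 1 (i then strictly increases).
def pvGoB (fuel : Nat) (t p s : List Char) (i : Nat) (text : List Char) : List (List Char × Option (List Char)) :=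
  match fuel with
  | 0 => []
  | fuel + 1 =>
    if i < t.length then
      if PySem.Chars.startswith (t.drop i) p then
        let j := PySem.Chars.findFrom t s ((i : Int) + p.length) none
        if j ≠ -1 then
          (text, some (PySem.Chars.slice t (some ((i : Int) + p.length)) (some j)))
            :: pvGoB fuel t p s (j.toNat + s.length) []
        else pvGoB fuel t p s (i + 1) (text ++ [t.getD i ' '])
      else pvGoB fuel t p s (i + 1) (text ++ [t.getD i ' '])
    else [(text, none)]

def find_queries_in_template_alt (template : String) (prefix_ : String) (sufix : String) : List (String × Option String) :=
  (pvGoB (template.toList.length + 1) template.toList prefix_.toList sufix.toList 0 []).map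
    (fun q => (String.ofList q.1, q.2.map String.ofList))

-- ===== PRECONDITION & SPEC =====
-- Pre_ excludes exactly prefix = "" ∧ sufix = "", where A is an infinite generator
-- (it re-slices template[0:] forever) and so never returns a finite result.
def Pre_find_queries_in_template (template : String) (prefix_ : String) (sufix : String) : Prop :=
  ¬ (prefix_ = "" ∧ sufix = "")
instance (_template : String) (prefix_ : String) (sufix : String) : Decidable (Pre_find_queries_in_template _template prefix_ sufix) := by unfold Pre_find_queries_in_template; infer_instance

def pvWitness_find_queries_in_template : String × String × String := ("ab{x}cd", "{", "}")

def Spec_find_queries_in_template (template : String) (prefix_ : String) (sufix : String) (out : List (String × Option String)) : Prop := out = find_queries_in_template_alt template prefix_ sufix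
instance (template : String) (prefix_ : String) (sufix : String) (out : List (String × Option String)) : Decidable (Spec_find_queries_in_template template prefix_ sufix out) := by unfold Spec_find_queries_in_template; infer_instance

-- ===== CLAIM (what is proved, stated in full; the proofs are below) =====
def Claim_equal_find_queries_in_template : Prop := ∀ (template : String) (prefix_ : String) (sufix : String), Dom_find_queries_in_template template prefix_ sufix → Pre_find_queries_in_template template prefix_ sufix → Spec_find_queries_in_template template prefix_ sufix (find_queries_in_template template prefix_ sufix)

-- ===== LEMMAS AND PROOFS =====

-- dead-end lemma: once no sufix can follow any prefix occurrence at or after i,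
-- B just sweeps up the rest of the template as text.
lemma pvGoB_dead (t p s : List Char) :
    ∀ (fuel : Nat) (i : Nat) (text : List Char), i ≤ t.length → t.length - i < fuel →
      (∀ i', i ≤ i' → p <+: t.drop i' → ¬ s <:+: t.drop (i' + p.length)) →
      pvGoB fuel t p s i text = [(text ++ t.drop i, none)] := by
  intro fuel
  induction fuel with
  | zero => intro i text hi hf hd; omega
  | succ fuel ih =>
    intro i text hi hf hd
    simp only [pvGoB]
    by_cases hlt : i < t.length
    · rw [if_pos hlt]
      have hstep : pvGoB fuel t p s (i + 1) (text ++ [t.getD i ' '])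
          = [(text ++ t.drop i, none)] := by
        rw [ih (i + 1) (text ++ [t.getD i ' ']) (by omega) (by omega)
              (fun i' h1 h2 => hd i' (by omega) h2)]
        rw [List.drop_eq_getElem_cons hlt, List.getD_eq_getElem t ' ' hlt]
        simp
      by_cases hsw : PySem.Chars.startswith (t.drop i) p
      · rw [if_pos hsw]
        have hpre : p <+: t.drop i := (PySem.Chars.startswith_iff _ _).mp hsw
        have hfit : i + p.length ≤ t.length := by
          have := hpre.length_le; simp only [List.length_drop] at this; omega
        have hj : PySem.Chars.findFrom t s ((i : Int) + p.length) none = -1 := by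
          rw [show ((i : Int) + p.length) = ((i + p.length : Nat) : Int) by push_cast; ring]
          exact (PySem.Chars.findFrom_natCast_eq_neg_one_iff t s (i + p.length) hfit).mpr
            (hd i (le_refl i) hpre)
        rw [hj]
        simpa using hstep
      · rw [if_neg hsw]
        exact hstep
    · rw [if_neg hlt]
      have : i = t.length := by omega
      simp [this]

-- A's find on a remainder, characterised: if p matches at i and nowhere in [pos, i),
-- then find (t.drop pos) p points exactly at i - pos.
lemma pvFind_drop_eq (t p : List Char) (pos i : Nat) (hpi : pos ≤ i)
    (hmatch : p <+: t.drop i) (hclean : ∀ k, pos ≤ k → k < i → ¬ p <+: t.drop k) :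
    PySem.Chars.find (t.drop pos) p = ((i - pos : Nat) : Int) := by
  have hdd : ∀ m : Nat, (t.drop pos).drop m = t.drop (pos + m) := by
    intro m; rw [List.drop_drop]
  have h0 : 0 ≤ PySem.Chars.find (t.drop pos) p := by
    rw [PySem.Chars.find_nonneg_iff, ← PySem.Chars.isIn_iff_infix,
        ← PySem.Chars.exists_prefix_drop_iff_isIn]
    exact ⟨i - pos, by rw [hdd, show pos + (i - pos) = i by omega]; exact hmatch⟩
  have hspec := PySem.Chars.find_spec h0
  have hle : (PySem.Chars.find (t.drop pos) p).toNat ≤ i - pos := by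
    by_contra hgt
    exact (hspec.2 (i - pos) (by omega))
      (by rw [hdd, show pos + (i - pos) = i by omega]; exact hmatch)
  have hge : i - pos ≤ (PySem.Chars.find (t.drop pos) p).toNat := by
    by_contra hgt
    exact hclean (pos + (PySem.Chars.find (t.drop pos) p).toNat) (by omega) (by omega)
      (by rw [← hdd]; exact hspec.1)
  omega

-- main invariant: B at cursor i with text = t[pos:i] (no prefix occurrence in [pos,i))
-- computes exactly A on the remainder t[pos:].
lemma pvGoB_eq_pvGoA (t p s : List Char) (hp : ¬ (p = [] ∧ s = [])) :
    ∀ (fuelB : Nat) (pos i : Nat) (fA : Nat), pos ≤ i → i ≤ t.length →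
      t.length - i < fuelB → t.length - pos < fA →
      (∀ k, pos ≤ k → k < i → ¬ p <+: t.drop k) →
      pvGoB fuelB t p s i ((t.drop pos).take (i - pos)) = pvGoA fA (t.drop pos) p s := by
  intro fuelB
  induction fuelB with
  | zero => intro pos i fA hpi hin hfB hfA hclean; omega
  | succ fuelB ih =>
    intro pos i fA hpi hin hfB hfA hclean
    obtain ⟨c, rfl⟩ := Nat.exists_eq_succ_of_ne_zero (by omega : fA ≠ 0)
    have hdd : ∀ m : Nat, (t.drop pos).drop m = t.drop (pos + m) := by
      intro m; rw [List.drop_drop]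
    simp only [pvGoB]
    by_cases hlt : i < t.length
    · rw [if_pos hlt]
      by_cases hsw : PySem.Chars.startswith (t.drop i) p
      · rw [if_pos hsw]
        have hpre : p <+: t.drop i := (PySem.Chars.startswith_iff _ _).mp hsw
        have hfit : i + p.length ≤ t.length := by
          have := hpre.length_le; simp only [List.length_drop] at this; omega
        have hps : 1 ≤ p.length + s.length := by
          rcases Nat.eq_zero_or_pos p.length with h0 | h1
          · have hpnil : p = [] := List.length_eq_zero_iff.mp h0
            have hsne : s ≠ [] := fun hs => hp ⟨hpnil, hs⟩
            have := List.length_pos_iff.mpr hsne; omega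
          · omega
        have hfind := pvFind_drop_eq t p pos i hpi hpre hclean
        have hdropB : (t.drop pos).drop (i - pos + p.length) = t.drop (i + p.length) := by
          rw [hdd, show pos + (i - pos + p.length) = i + p.length by omega]
        have hBarg : ((i : Int) + p.length) = ((i + p.length : Nat) : Int) := by
          push_cast; ring
        have hAarg : (((i - pos : Nat) : Int) + p.length)
            = ((i - pos + p.length : Nat) : Int) := by push_cast; ring
        have hBf := PySem.Chars.findFrom_natCast t s (i + p.length) hfit
        have hAf := PySem.Chars.findFrom_natCast (t.drop pos) s (i - pos + p.length)
          (by simp only [List.length_drop]; omega)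
        rw [hdropB] at hAf
        rw [hBarg, hBf]
        simp only [pvGoA, hfind]
        rw [if_neg (show ¬ ((i - pos : Nat) : Int) = -1 by omega)]
        rw [hAarg, hAf]
        by_cases hq : PySem.Chars.find (t.drop (i + p.length)) s = -1
        · -- no sufix anywhere from here on: both sides emit the whole remainder as text
          have hnos : ¬ s <:+: t.drop (i + p.length) :=
            (PySem.Chars.find_eq_neg_one_iff _ _).mp hq
          have hdall : ∀ i', i ≤ i' → p <+: t.drop i' → ¬ s <:+: t.drop (i' + p.length) := by
            intro i' hii' _ hcon
            apply hnos
            have hsplit : t.drop (i' + p.length) = (t.drop (i + p.length)).drop (i' - i) := by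
              rw [List.drop_drop]; congr 1; omega
            rw [hsplit] at hcon
            exact hcon.trans (List.drop_suffix _ _).isInfix
          rw [if_pos hq, if_pos hq]
          simp only [if_neg (by simp : ¬ ((-1 : Int) ≠ -1))]
          rw [pvGoB_dead t p s fuelB (i + 1) ((t.drop pos).take (i - pos) ++ [t.getD i ' '])
               (by omega) (by omega) (fun i' h1 h2 => hdall i' (by omega) h2)]
          have : (t.drop pos).take (i - pos) ++ [t.getD i ' '] ++ t.drop (i + 1)
              = t.drop pos := by
            rw [List.getD_eq_getElem t ' ' hlt, List.append_assoc, List.singleton_append,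
                ← List.drop_eq_getElem_cons hlt,
                show t.drop i = (t.drop pos).drop (i - pos) by
                  rw [hdd, show pos + (i - pos) = i by omega],
                List.take_append_drop]
          rw [this]
          simp
        · -- a full prefix/sufix match: both sides emit the same pair and recurse in step
          rw [if_neg hq, if_neg hq]
          have hq0 : 0 ≤ PySem.Chars.find (t.drop (i + p.length)) s := by
            have := PySem.Chars.neg_one_le_find (t.drop (i + p.length)) s; omega
          obtain ⟨mm, hmm⟩ := Int.eq_ofNat_of_zero_le hq0
          have hmfit : mm + s.length ≤ t.length - (i + p.length) := by
            have hpre' : s <+: (t.drop (i + p.length)).drop mm := by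
              have := (PySem.Chars.find_spec hq0).1
              rwa [hmm, Int.toNat_natCast] at this
            have h1 := hpre'.length_le
            have h2 : (mm : Int) ≤ (t.drop (i + p.length)).length := by
              rw [← hmm]; exact PySem.Chars.find_le_length _ _
            simp only [List.length_drop] at h1 h2
            have h2' : mm ≤ t.length - (i + p.length) := by exact_mod_cast h2
            omega
          rw [hmm]
          rw [show ((i + p.length : Nat) : Int) + (mm : Int) = ((i + p.length + mm : Nat) : Int)
                by push_cast; ring,
              show ((i - pos + p.length : Nat) : Int) + (mm : Int)
                  = ((i - pos + p.length + mm : Nat) : Int) by push_cast; ring]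
          rw [if_pos (show ((i + p.length + mm : Nat) : Int) ≠ -1 by omega),
              if_neg (show ¬ ((i - pos + p.length + mm : Nat) : Int) = -1 by omega)]
          have hjtail : (((i + p.length + mm : Nat) : Int).toNat + s.length)
              = i + p.length + mm + s.length := by
            rw [Int.toNat_natCast]
          congr 1
          · -- the emitted pair
            congr 1
            · simp only [PySem.Chars.slice, PySem.List.slice_to_natCast]
            · congr 1
              simp only [PySem.Chars.slice]
              rw [PySem.List.slice_natCast, PySem.List.slice_natCast, hdropB]
              congr 1
              omega
          · -- the tails
            have hslA : PySem.Chars.slice (t.drop pos)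
                (some (((i - pos + p.length + mm : Nat) : Int) + (s.length : Int))) none
                = t.drop (i + p.length + mm + s.length) := by
              simp only [PySem.Chars.slice]
              rw [show ((i - pos + p.length + mm : Nat) : Int) + (s.length : Int)
                    = ((i - pos + p.length + mm + s.length : Nat) : Int) by push_cast; ring,
                  PySem.List.slice_from_natCast, hdd,
                  show pos + (i - pos + p.length + mm + s.length)
                      = i + p.length + mm + s.length by omega]
            rw [hslA, hjtail]
            have := ih (i + p.length + mm + s.length) (i + p.length + mm + s.length) c
              (le_refl _) (by omega) (by omega) (by omega)
              (fun k h1 h2 => absurd h1 (by omega))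
            simpa using this
      · -- no prefix at i: B consumes one text character, A is unchanged
        rw [if_neg hsw]
        have hnp : ¬ p <+: t.drop i := fun hcon =>
          hsw ((PySem.Chars.startswith_iff _ _).mpr hcon)
        have htext : (t.drop pos).take (i - pos) ++ [t.getD i ' ']
            = (t.drop pos).take (i + 1 - pos) := by
          have hlt' : i - pos < (t.drop pos).length := by
            simp only [List.length_drop]; omega
          rw [List.getD_eq_getElem t ' ' hlt,
              show i + 1 - pos = (i - pos) + 1 by omega, List.take_add_one]
          congr 1
          rw [List.getElem?_drop, show pos + (i - pos) = i by omega,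
              List.getElem?_eq_getElem hlt]
          rfl
        rw [htext]
        exact ih pos (i + 1) (c + 1) (by omega) (by omega) (by omega) (by omega)
          (fun k h1 h2 => by
            rcases Nat.lt_or_ge k i with hk | hk
            · exact hclean k h1 hk
            · have : k = i := by omega
              rw [this]; exact hnp)
    · -- cursor at the end: B emits the accumulated text, A finds nothing usable
      rw [if_neg hlt]
      have hie : i = t.length := by omega
      have htake : (t.drop pos).take (i - pos) = t.drop pos :=
        List.take_of_length_le (by simp only [List.length_drop]; omega)
      rw [htake]
      simp only [pvGoA]
      rcases List.eq_nil_or_concat p with hpnil | hpne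
      · -- p = []: hclean forces pos = i = length, both sides give [([], none)]
        subst hpnil
        have hposi : pos = i := by
          by_contra hne
          exact hclean pos (le_refl pos) (by omega) (List.nil_prefix)
        have hdnil : t.drop pos = [] := by
          rw [hposi, hie]; exact List.drop_length
        have hsne : s ≠ [] := fun hsnil => hp ⟨rfl, hsnil⟩
        rw [hdnil]
        have hfind0 : PySem.Chars.find ([] : List Char) ([] : List Char) = 0 :=
          PySem.Chars.find_nil []
        rw [hfind0]
        rw [if_neg (by intro hcon; omega : ¬ (0 : Int) = -1)]
        have he : PySem.Chars.findFrom ([] : List Char) s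
            ((0 : Int) + (([] : List Char).length : Int)) none = -1 := by
          rw [show ((0 : Int) + (([] : List Char).length : Int)) = ((0 : Nat) : Int) by simp]
          exact (PySem.Chars.findFrom_natCast_eq_neg_one_iff [] s 0 (by simp)).mpr
            (by rw [List.drop_nil]; intro hcon; exact hsne (List.infix_nil.mp hcon))
        rw [he]
        simp
      · -- p ≠ []: p occurs nowhere in t.drop pos, A's first find fails
        have hpne' : p ≠ [] := by
          obtain ⟨l, a, rfl⟩ := hpne; simp
        have hnofind : PySem.Chars.find (t.drop pos) p = -1 := by
          rw [PySem.Chars.find_eq_neg_one_iff]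
          intro hcon
          obtain ⟨j, hj⟩ := (PySem.Chars.exists_prefix_drop_iff_isIn p (t.drop pos)).mpr
            ((PySem.Chars.isIn_iff_infix _ _).mpr hcon)
          rw [hdd] at hj
          rcases Nat.lt_or_ge (pos + j) i with hk | hk
          · exact hclean (pos + j) (by omega) hk hj
          · have : t.drop (pos + j) = [] :=
              List.drop_eq_nil_of_le (by omega)
            rw [this] at hj
            exact hpne' (List.prefix_nil.mp hj)
        rw [hnofind]
        simp

-- ===== VERDICT (by name: the statement is the Claim_ definition above) =====
theorem find_queries_in_template_spec : Claim_equal_find_queries_in_template := by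
  intro template prefix_ sufix _ hpre
  unfold Spec_find_queries_in_template find_queries_in_template find_queries_in_template_alt
  have hp : ¬ (prefix_.toList = [] ∧ sufix.toList = []) := by
    unfold Pre_find_queries_in_template at hpre
    intro ⟨h1, h2⟩
    exact hpre ⟨by simp_all, by simp_all⟩
  have := pvGoB_eq_pvGoA template.toList prefix_.toList sufix.toList hp
    (template.toList.length + 1) 0 0 (template.toList.length + 1)
    (le_refl 0) (Nat.zero_le _) (by omega) (by omega) (by omega)
  simp only [List.drop_zero, Nat.sub_zero, List.take_zero] at this
  rw [this]
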